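-- pv_equiv track=rewrite | github.com/olafleur/advent-of-code | 2023/day12-1.py | is_valid_arrangement
-- ===== SOURCE A (Python) =====
-- def is_valid_arrangement(string, numbers):
--     current_series_number = 0
--     calculated_numbers = []
--
--     for char in string:
--         if char == '#':
--             current_series_number += 1
--         if char == '.':
--             if current_series_number > 0:
--                 calculated_numbers.append(current_series_number)
--                 current_series_number = 0
--
--     if current_series_number > 0:
--         calculated_numbers.append(current_series_number)
--
--     return calculated_numbers == numbers
--
-- numbers = []
-- ===== SOURCE B (Python) =====
-- def is_valid_arrangement(string, numbers):
--     groups = [seg.count('#') for seg in string.split('.') if seg.count('#') > 0]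
--     return groups == numbers
-- ===== Notes on version B (the rewrite author's own statement) =====
-- stated objective: idiomatic
-- what changed: Replaces the char-by-char counter/flush state machine with a split('.')-then-count-per-segment comprehension compared directly to numbers; the per-character work moves into C-level str.split/str.count.
import Mathlib
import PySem

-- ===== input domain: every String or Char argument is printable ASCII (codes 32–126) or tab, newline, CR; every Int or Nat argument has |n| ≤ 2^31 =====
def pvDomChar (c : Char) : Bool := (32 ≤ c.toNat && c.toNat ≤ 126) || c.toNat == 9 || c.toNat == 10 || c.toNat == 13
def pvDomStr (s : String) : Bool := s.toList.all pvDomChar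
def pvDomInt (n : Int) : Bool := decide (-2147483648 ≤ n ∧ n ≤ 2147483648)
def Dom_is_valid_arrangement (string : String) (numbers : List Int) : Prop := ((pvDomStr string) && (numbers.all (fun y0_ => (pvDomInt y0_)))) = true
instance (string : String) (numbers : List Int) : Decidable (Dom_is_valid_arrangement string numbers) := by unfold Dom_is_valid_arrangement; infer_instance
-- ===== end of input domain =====

-- B replaces A's char-by-char counter/flush state machine with split('.') then a
-- count-of-'#' per segment (idiomatic; same cost). Equivalence is total.

-- ===== PORT A =====
-- one loop iteration of A: maybe bump the counter, maybe flush it on '.'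
def pvStepA (st : Int × List Int) (c : Char) : Int × List Int :=
  let cur := if c == '#' then st.1 + 1 else st.1
  if c == '.' then (if cur > 0 then (0, st.2 ++ [cur]) else (cur, st.2)) else (cur, st.2)

def is_valid_arrangement (string : String) (numbers : List Int) : Bool :=
  let fin := string.toList.foldl pvStepA (0, [])
  let calculated := if fin.1 > 0 then fin.2 ++ [fin.1] else fin.2
  calculated == numbers

-- ===== PORT B =====
-- string.split('.') is List.splitOn '.' on the characters; seg.count('#') is List.count
def is_valid_arrangement_alt (string : String) (numbers : List Int) : Bool :=
  let groups := ((string.toList.splitOn '.').filter (fun seg => seg.count '#' > 0)).map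
      (fun seg => ((seg.count '#' : Nat) : Int))
  groups == numbers

-- ===== PRECONDITION & SPEC =====
def Spec_is_valid_arrangement (string : String) (numbers : List Int) (out : Bool) : Prop := out = is_valid_arrangement_alt string numbers
instance (string : String) (numbers : List Int) (out : Bool) : Decidable (Spec_is_valid_arrangement string numbers out) := by unfold Spec_is_valid_arrangement; infer_instance

-- ===== CLAIM (what is proved, stated in full; the proofs are below) =====
def Claim_equal_is_valid_arrangement : Prop := ∀ (string : String) (numbers : List Int), Dom_is_valid_arrangement string numbers → Spec_is_valid_arrangement string numbers (is_valid_arrangement string numbers)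

-- ===== LEMMAS AND PROOFS =====

-- canonical group list: pvG cs cur = the '#'-group lengths of cs with a group of
-- size cur already open on the left
def pvG : List Char → Int → List Int
  | [], cur => if cur > 0 then [cur] else []
  | c :: cs, cur =>
      if c = '.' then (if cur > 0 then cur :: pvG cs 0 else pvG cs cur)
      else if c = '#' then pvG cs (cur + 1) else pvG cs cur

-- pvH segs k = group lengths read off a segment list, k pending '#'s joining the first segment
def pvH : List (List Char) → Nat → List Int
  | [], _ => []
  | s :: rest, k =>
      (if 0 < k + s.count '#' then [((k + s.count '#' : Nat) : Int)] else []) ++ pvH rest 0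

theorem pvA_eq_pvG (cs : List Char) (cur : Int) (acc : List Int) :
    (let fin := cs.foldl pvStepA (cur, acc);
     if fin.1 > 0 then fin.2 ++ [fin.1] else fin.2) = acc ++ pvG cs cur := by
  induction cs generalizing cur acc with
  | nil => simp only [List.foldl_nil, pvG]; split_ifs <;> simp
  | cons c cs ih =>
    by_cases hdot : c = '.'
    · subst hdot
      simp only [List.foldl_cons, pvStepA, pvG]
      by_cases hpos : cur > 0
      · simp [hpos, ih, List.append_assoc]
      · simp [hpos, ih]
    · by_cases hhash : c = '#'
      · subst hhash
        simp only [List.foldl_cons, pvStepA, pvG]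
        simp [ih]
      · simp only [List.foldl_cons, pvStepA, pvG]
        simp [hdot, hhash, ih]

theorem pvH_zero_eq (segs : List (List Char)) :
    pvH segs 0
      = (segs.filter (fun s => s.count '#' > 0)).map (fun s => ((s.count '#' : Nat) : Int)) := by
  induction segs with
  | nil => rfl
  | cons s rest ih =>
    simp only [pvH, Nat.zero_add, ih, List.filter_cons]
    by_cases h : 0 < s.count '#'
    · simp [h]
    · simp [h]

theorem pvG_eq_pvH (cs : List Char) (k : Nat) :
    pvG cs (k : Int) = pvH (cs.splitOn '.') k := by
  induction cs generalizing k with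
  | nil =>
    simp only [List.splitOn_nil, pvG, pvH, List.count_nil, Nat.add_zero]
    by_cases h : 0 < k
    · have h' : (0 : Int) < (k : Int) := by exact_mod_cast h
      simp [h]
    · have h' : ¬ (0 : Int) < (k : Int) := by exact_mod_cast h
      simp [h]
  | cons c cs ih =>
    by_cases hdot : c = '.'
    · subst hdot
      have hsplit : ('.' :: cs).splitOn '.' = [] :: cs.splitOn '.' := by
        simp [List.splitOn, List.splitOnP_cons]
      rw [hsplit]
      simp only [pvG, pvH, List.count_nil, Nat.add_zero]
      have h0 : pvG cs ((0 : Nat) : Int) = pvH (cs.splitOn '.') 0 := ih 0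
      rw [show ((0 : Nat) : Int) = (0 : Int) from rfl] at h0
      by_cases h : 0 < k
      · have h' : (0 : Int) < (k : Int) := by exact_mod_cast h
        simp [h, h0]
      · have hk0 : k = 0 := by omega
        subst hk0
        simp [h0]
    · obtain ⟨s, rest, hsr⟩ := List.exists_cons_of_ne_nil
        (show cs.splitOn '.' ≠ [] by simp [List.splitOn]; exact List.splitOnP_ne_nil _ _)
      have hsplit : (c :: cs).splitOn '.' = (c :: s) :: rest := by
        simp [List.splitOn, List.splitOnP_cons, hdot]
        have h2 : cs.splitOnP (· == '.') = s :: rest := by simpa [List.splitOn] using hsr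
        simp [h2]
      rw [hsplit]
      by_cases hhash : c = '#'
      · subst hhash
        simp only [pvG, if_neg hdot]
        have h1 : pvG cs ((k + 1 : Nat) : Int) = pvH (cs.splitOn '.') (k + 1) := ih (k + 1)
        rw [show ((k + 1 : Nat) : Int) = (k : Int) + 1 by push_cast; ring] at h1
        rw [h1, hsr]
        simp only [pvH, List.count_cons]
        have e1 : k + 1 + s.count '#' = k + (s.count '#' + if '#' = '#' then 1 else 0) := by
          simp; omega
        rw [e1]
        simp
      · simp only [pvG, if_neg hdot, if_neg hhash]
        rw [ih k, hsr]
        simp only [pvH, List.count_cons]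
        have e1 : (c == '#') = false := by simpa using hhash
        rw [e1]
        simp

theorem pvB_groups (cs : List Char) :
    ((cs.splitOn '.').filter (fun seg => seg.count '#' > 0)).map
      (fun seg => ((seg.count '#' : Nat) : Int)) = pvG cs 0 := by
  rw [← pvH_zero_eq, ← pvG_eq_pvH]
  rfl

-- ===== VERDICT (by name: the statement is the Claim_ definition above) =====
theorem is_valid_arrangement_spec : Claim_equal_is_valid_arrangement := by
  intro string numbers _
  unfold Spec_is_valid_arrangement is_valid_arrangement is_valid_arrangement_alt
  rw [pvB_groups]
  have := pvA_eq_pvG string.toList 0 []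
  simp only [List.nil_append] at this
  simp only [this]
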